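-- pv_equiv track=rewrite | github.com/tajokim89/facility-7 | comfyui/generate_sequence.py | _subgraph_from
-- ===== SOURCE A (Python) =====
-- from collections import defaultdict, deque
--
-- def _subgraph_from(root_id, all_scenes):
--     """root_id를 시작점으로 하는 체인 씬 전체 수집 (BFS)."""
--     result = {}
--     queue = deque([root_id])
--     # 역방향 인덱스: parent → children
--     children_of = defaultdict(list)
--     for sid, scene in all_scenes.items():
--         parent = scene.get("chain_from")
--         if parent:
--             children_of[parent].append(sid)
--
--     while queue:
--         cur = queue.popleft()
--         if cur in all_scenes:
--             result[cur] = all_scenes[cur]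
--         for child in children_of[cur]:
--             queue.append(child)
--     return result
-- ===== SOURCE B (Python) =====
-- def _subgraph_from(root_id, all_scenes):
--     """Staged: grow the visit order as an index-cursored worklist (children found by
--     scanning all_scenes per node, no reverse index), collect (id, scene) pairs in
--     discovery order, then build the dict once at the end."""
--     pairs = []
--     queue = [root_id]
--     i = 0
--     while i < len(queue):
--         cur = queue[i]
--         i += 1
--         if cur in all_scenes:
--             pairs.append((cur, all_scenes[cur]))
--         queue.extend(sid for sid, scene in all_scenes.items()
--                      if scene.get("chain_from") and scene["chain_from"] == cur)
--     return dict(pairs)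
-- ===== Notes on version B (the rewrite author's own statement) =====
-- stated objective: simpler
-- what changed: Replaces the deque+precomputed reverse index and the interleaved dict writes by an index-cursored growing worklist whose children are found by a direct scan of all_scenes, collecting (id, scene) pairs in discovery order and building the dict once with dict(pairs) at the end.
import Mathlib
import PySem

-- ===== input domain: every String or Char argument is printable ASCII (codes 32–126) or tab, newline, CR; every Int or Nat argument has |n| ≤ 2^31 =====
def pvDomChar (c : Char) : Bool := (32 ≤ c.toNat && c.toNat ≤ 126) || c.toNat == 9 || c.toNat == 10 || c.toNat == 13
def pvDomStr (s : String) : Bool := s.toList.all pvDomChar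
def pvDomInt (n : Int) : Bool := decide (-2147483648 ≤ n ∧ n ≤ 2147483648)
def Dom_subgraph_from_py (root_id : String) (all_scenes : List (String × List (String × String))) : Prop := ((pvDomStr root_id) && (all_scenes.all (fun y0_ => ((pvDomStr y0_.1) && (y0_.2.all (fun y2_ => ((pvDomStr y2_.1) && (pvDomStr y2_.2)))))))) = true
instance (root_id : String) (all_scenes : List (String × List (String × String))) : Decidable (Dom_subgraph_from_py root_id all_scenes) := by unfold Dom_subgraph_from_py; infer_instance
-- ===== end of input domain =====

-- B drops the deque and the precomputed reverse index: an index-cursored growing worklist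
-- with a per-node scan of all_scenes, collecting pairs and building the dict once (simpler, not faster).


-- ===== PORT A =====
-- children_of = defaultdict(list); for sid, scene in all_scenes.items(): parent = scene.get("chain_from"); if parent: children_of[parent].append(sid)
def pvBStep (d : PySem.Dict String (List String)) (p : String × List (String × String)) : PySem.Dict String (List String) :=
  match (PySem.Dict.mk p.2).get? "chain_from" with
  | some parent => if parent ≠ "" then d.modify parent [] (· ++ [p.1]) else d
  | none => d

def pvBuildChildren (all_scenes : List (String × List (String × String))) : PySem.Dict String (List String) :=
  all_scenes.foldl pvBStep PySem.Dict.empty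

-- the while-queue loop; fuel = all_scenes.length + 1 pops suffice whenever the Python loop
-- terminates (each scene id is then enqueued at most once, plus the root)
def pvALoop (all_scenes : List (String × List (String × String)))
    (children : PySem.Dict String (List String)) :
    Nat → List String → PySem.Dict String (List (String × String)) → PySem.Dict String (List (String × String))
  | _, [], res => res
  | 0, _ :: _, res => res
  | fuel+1, cur :: q, res =>
    let res' := match (PySem.Dict.mk all_scenes).get? cur with
      | some v => res.insert cur v
      | none => res
    pvALoop all_scenes children fuel (q ++ children.getD cur []) res'

def subgraph_from_py (root_id : String) (all_scenes : List (String × List (String × String))) : List (String × List (String × String)) :=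
  (pvALoop all_scenes (pvBuildChildren all_scenes) (all_scenes.length + 1) [root_id] PySem.Dict.empty).items

-- ===== PORT B =====
-- scene.get("chain_from") and scene["chain_from"] == cur  (truthy = nonempty string)
def pvIsChild (cur : String) (p : String × List (String × String)) : Bool :=
  match (PySem.Dict.mk p.2).get? "chain_from" with
  | some parent => decide (parent ≠ "") && (parent == cur)
  | none => false

-- queue.extend(sid for sid, scene in all_scenes.items() if …)
def pvKids (all_scenes : List (String × List (String × String))) (cur : String) : List String :=
  (all_scenes.filter (pvIsChild cur)).map Prod.fst

-- the index-cursored worklist loop: one fuel unit per iteration (same budget as port A's pops);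
-- state = (queue, i, pairs); collects (id, scene) pairs in discovery order
def pvBWork (all_scenes : List (String × List (String × String))) :
    Nat → List String → Nat → List (String × List (String × String)) → List (String × List (String × String))
  | 0, _, _, pairs => pairs
  | fuel+1, queue, i, pairs =>
    if h : i < queue.length then
      let cur := queue[i]
      let pairs' := match (PySem.Dict.mk all_scenes).get? cur with
        | some v => pairs ++ [(cur, v)]
        | none => pairs
      pvBWork all_scenes fuel (queue ++ pvKids all_scenes cur) (i + 1) pairs'
    else pairs

-- return dict(pairs)
def subgraph_from_py_alt (root_id : String) (all_scenes : List (String × List (String × String))) : List (String × List (String × String)) :=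
  ((pvBWork all_scenes (all_scenes.length + 1) [root_id] 0 []).foldl
    (fun d p => d.insert p.1 p.2) PySem.Dict.empty).items

-- ===== PRECONDITION & SPEC =====
def Spec_subgraph_from_py (root_id : String) (all_scenes : List (String × List (String × String))) (out : List (String × List (String × String))) : Prop := out = subgraph_from_py_alt root_id all_scenes
instance (root_id : String) (all_scenes : List (String × List (String × String))) (out : List (String × List (String × String))) : Decidable (Spec_subgraph_from_py root_id all_scenes out) := by unfold Spec_subgraph_from_py; infer_instance

-- ===== CLAIM (what is proved, stated in full; the proofs are below) =====
def Claim_equal_subgraph_from_py : Prop := ∀ (root_id : String) (all_scenes : List (String × List (String × String))), Dom_subgraph_from_py root_id all_scenes → Spec_subgraph_from_py root_id all_scenes (subgraph_from_py root_id all_scenes)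

-- ===== LEMMAS AND PROOFS =====
-- One step of A's reverse-index build, looked up at cur, contributes exactly B's filter test.
theorem pv_step (cur : String) (d : PySem.Dict String (List String))
    (p : String × List (String × String)) :
    (pvBStep d p).getD cur [] = d.getD cur [] ++ (if pvIsChild cur p then [p.1] else []) := by
  unfold pvBStep pvIsChild
  cases hp : (PySem.Dict.mk p.2).get? "chain_from" with
  | none => simp
  | some parent =>
    by_cases hne : parent = ""
    · simp [hne]
    · by_cases hc : parent = cur
      · subst hc
        simp [hne, PySem.Dict.getD_modify_self]
      · simp [hne, hc, PySem.Dict.getD_modify_of_ne _ _ _ (fun h => hc h.symm)]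

-- A's prebuilt reverse index at cur is B's per-node filter scan.
theorem pv_build_eq_kids (l : List (String × List (String × String))) (cur : String) :
    ∀ d : PySem.Dict String (List String),
    (l.foldl pvBStep d).getD cur [] = d.getD cur [] ++ pvKids l cur := by
  induction l with
  | nil => intro d; simp [pvKids]
  | cons p rest ih =>
    intro d
    simp only [List.foldl_cons]
    rw [ih (pvBStep d p), pv_step]
    by_cases h : pvIsChild cur p <;> simp [pvKids, h]

theorem pvKids_eq (all_scenes : List (String × List (String × String))) (cur : String) :
    (pvBuildChildren all_scenes).getD cur [] = pvKids all_scenes cur := by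
  unfold pvBuildChildren
  rw [pv_build_eq_kids]
  simp [PySem.Dict.getD_empty]

-- B's cursor position i into its growing queue tracks A's FIFO queue (= queue.drop i),
-- and folding dict-inserts over B's collected pairs replays A's interleaved inserts.
theorem pvBWork_eq_ALoop (all_scenes : List (String × List (String × String))) :
    ∀ (fuel : Nat) (queue : List String) (i : Nat) (_hi : i ≤ queue.length)
      (pairs : List (String × List (String × String)))
      (res : PySem.Dict String (List (String × String))),
    (pvBWork all_scenes fuel queue i pairs).foldl (fun d p => d.insert p.1 p.2) res
      = pvALoop all_scenes (pvBuildChildren all_scenes) fuel (queue.drop i)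
          (pairs.foldl (fun d p => d.insert p.1 p.2) res) := by
  intro fuel
  induction fuel with
  | zero =>
    intro queue i _hi pairs res
    cases h : queue.drop i with
    | nil => simp [pvBWork, pvALoop]
    | cons a t => simp [pvBWork, pvALoop]
  | succ fuel ih =>
    intro queue i _hi pairs res
    by_cases h : i < queue.length
    · have hdrop : queue.drop i = queue[i] :: queue.drop (i + 1) :=
        List.drop_eq_getElem_cons h
      rw [pvBWork, dif_pos h, hdrop, pvALoop]
      have hdrop2 : (queue ++ pvKids all_scenes queue[i]).drop (i + 1)
          = queue.drop (i + 1) ++ pvKids all_scenes queue[i] :=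
        List.drop_append_of_le_length h
      rw [ih _ _ (by simp; omega), hdrop2, pvKids_eq]
      cases hg : (PySem.Dict.mk all_scenes).get? queue[i] <;> simp
    · have hdrop : queue.drop i = [] := List.drop_eq_nil_of_le (by omega)
      rw [pvBWork, dif_neg h, hdrop, pvALoop]

-- ===== VERDICT (by name: the statement is the Claim_ definition above) =====
theorem subgraph_from_py_spec : Claim_equal_subgraph_from_py := by
  intro root_id all_scenes _
  unfold Spec_subgraph_from_py subgraph_from_py subgraph_from_py_alt
  rw [pvBWork_eq_ALoop all_scenes _ [root_id] 0 (by simp)]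
  simp
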